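-- pv_equiv track=rewrite | github.com/Janeesha-gallala/intro_speech_understanding | lec04/homework4.py | next_birthday
-- ===== SOURCE A (Python) =====
-- def next_birthday(date, birthdays):
--     """
--     Find the next birthday after the given date.
--
--     @param:
--     date - a tuple of two integers specifying (month, day)
--     birthdays - a dict mapping from date tuples to lists of names, for example,
--       birthdays[(1,10)] = list of all people with birthdays on January 10.
--
--     @return:
--     birthday - the next day, after given date, on which somebody has a birthday
--     list_of_names - list of all people with birthdays on that date
--     """
--     if not birthdays:
--         return (1, 1), []
--
--     # Sort all birthday dates
--     all_dates = sorted(birthdays.keys())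
--
--     # Try to find a birthday after the given date
--     for d in all_dates:
--         if d[0] > date[0] or (d[0] == date[0] and d[1] > date[1]):
--             return d, birthdays[d]
--
--     # If not found, wrap around to the first birthday in the next year
--     first = all_dates[0]
--     return first, birthdays[first]
-- ===== SOURCE B (Python) =====
-- def next_birthday(date, birthdays):
--     if not birthdays:
--         return (1, 1), []
--     best_next = None
--     best_all = None
--     for k, names in birthdays.items():
--         if k > date and (best_next is None or k < best_next[0]):
--             best_next = (k, names)
--         if best_all is None or k < best_all[0]:
--             best_all = (k, names)
--     return best_next if best_next is not None else best_all
-- ===== Notes on version B (the rewrite author's own statement) =====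
-- stated objective: faster
-- what changed: Replaces sort-then-scan (sort all keys, scan for the first key after the date, wrap to the sorted head) by a single linear pass that maintains two running candidates: the smallest key strictly after the date and the smallest key overall, each with its name list.
import Mathlib
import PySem

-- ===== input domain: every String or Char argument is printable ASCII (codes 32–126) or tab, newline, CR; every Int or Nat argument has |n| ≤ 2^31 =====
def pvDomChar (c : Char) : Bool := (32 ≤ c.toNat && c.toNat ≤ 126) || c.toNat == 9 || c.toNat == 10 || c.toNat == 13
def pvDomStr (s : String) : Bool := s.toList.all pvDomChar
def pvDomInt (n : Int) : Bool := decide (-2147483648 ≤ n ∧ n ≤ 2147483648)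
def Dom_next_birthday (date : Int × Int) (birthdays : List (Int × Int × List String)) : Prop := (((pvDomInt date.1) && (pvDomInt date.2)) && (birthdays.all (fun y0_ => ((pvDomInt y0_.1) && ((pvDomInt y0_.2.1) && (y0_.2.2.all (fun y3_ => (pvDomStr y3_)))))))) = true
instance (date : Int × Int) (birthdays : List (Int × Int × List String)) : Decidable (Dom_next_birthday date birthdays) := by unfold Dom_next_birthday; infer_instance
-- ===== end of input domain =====

-- B replaces A's sort-then-scan by a single linear pass keeping two running minima (objective: faster).


-- ===== PORT A =====
-- birthdays[k]: first-match association lookup (the key is always present where the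
-- ports call it, so the [] default is never returned).
def nbLookup (bs : List (Int × Int × List String)) (k : Int × Int) : List String :=
  match bs with
  | [] => []
  | e :: t => if (e.1, e.2.1) = k then e.2.2 else nbLookup t k

def next_birthday (date : Int × Int) (birthdays : List (Int × Int × List String)) : (Int × Int) × List String :=
  if birthdays = [] then ((1, 1), []) else
  let all_dates := PySem.List.sorted2 (birthdays.map (fun e => (e.1, e.2.1))) (fun k => k.1) (fun k => k.2)
  match all_dates.find? (fun d => decide (d.1 > date.1 ∨ (d.1 = date.1 ∧ d.2 > date.2))) with
  | some d => (d, nbLookup birthdays d)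
  | none =>
    let first := all_dates.headD (1, 1)
    (first, nbLookup birthdays first)

-- ===== PORT B =====
-- Python tuple comparison a < b on (Int, Int) pairs (strict lexicographic).
def nbLt (a b : Int × Int) : Bool := decide (a.1 < b.1 ∨ (a.1 = b.1 ∧ a.2 < b.2))

def next_birthday_alt (date : Int × Int) (birthdays : List (Int × Int × List String)) : (Int × Int) × List String :=
  if birthdays = [] then ((1, 1), []) else
  let r := birthdays.foldl
    (fun (st : Option ((Int × Int) × List String) × Option ((Int × Int) × List String)) e =>
      let k : Int × Int := (e.1, e.2.1)
      ((if nbLt date k && (match st.1 with | none => true | some b => nbLt k b.1) then some (k, e.2.2) else st.1),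
       (if (match st.2 with | none => true | some b => nbLt k b.1) then some (k, e.2.2) else st.2)))
    (none, none)
  match r.1 with
  | some x => x
  | none => match r.2 with
    | some x => x
    | none => ((1, 1), [])

-- ===== PRECONDITION & SPEC =====
def Spec_next_birthday (date : Int × Int) (birthdays : List (Int × Int × List String)) (out : (Int × Int) × List String) : Prop := out = next_birthday_alt date birthdays
instance (date : Int × Int) (birthdays : List (Int × Int × List String)) (out : (Int × Int) × List String) : Decidable (Spec_next_birthday date birthdays out) := by unfold Spec_next_birthday; infer_instance

-- ===== CLAIM (what is proved, stated in full; the proofs are below) =====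
def Claim_equal_next_birthday : Prop := ∀ (date : Int × Int) (birthdays : List (Int × Int × List String)), Dom_next_birthday date birthdays → Spec_next_birthday date birthdays (next_birthday date birthdays)

-- ===== LEMMAS AND PROOFS =====

-- non-strict lexicographic order on key pairs
def nbLe (a b : Int × Int) : Prop := a.1 < b.1 ∨ (a.1 = b.1 ∧ a.2 ≤ b.2)
theorem nbLe_refl (a : Int × Int) : nbLe a a := by unfold nbLe; omega
theorem nbLe_trans {a b c : Int × Int} (h1 : nbLe a b) (h2 : nbLe b c) : nbLe a c := by
  unfold nbLe at *; omega

theorem nbLe_antisymm {a b : Int × Int} (h1 : nbLe a b) (h2 : nbLe b a) : a = b := by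
  unfold nbLe at h1 h2
  have : a.1 = b.1 ∧ a.2 = b.2 := by omega
  exact Prod.ext this.1 this.2

-- on a lex-sorted list, find? returns an element ≤ every qualifying element
theorem find?_sorted_min {S : List (Int × Int)} {p : Int × Int → Bool} {m : Int × Int}
    (hs : List.Pairwise nbLe S) (h : S.find? p = some m) :
    m ∈ S ∧ p m = true ∧ ∀ y ∈ S, p y = true → nbLe m y := by
  induction S with
  | nil => simp at h
  | cons x t ih =>
    rcases List.pairwise_cons.mp hs with ⟨hx, ht⟩
    by_cases hp : p x = true
    · rw [List.find?_cons_of_pos hp] at h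
      obtain rfl : x = m := by injection h
      refine ⟨List.mem_cons_self, hp, ?_⟩
      intro y hy _
      rcases List.mem_cons.mp hy with rfl | hy
      · exact nbLe_refl y
      · exact hx y hy
    · rw [List.find?_cons_of_neg (by simpa using hp)] at h
      obtain ⟨hm, hpm, hmin⟩ := ih ht h
      refine ⟨List.mem_cons_of_mem _ hm, hpm, ?_⟩
      intro y hy hpy
      rcases List.mem_cons.mp hy with rfl | hy
      · exact absurd hpy hp
      · exact hmin y hy hpy

-- B's single-candidate loop, abstracted over the qualifying test p
def nbSel (p : Int × Int → Bool) (L : List (Int × Int × List String)) : Option ((Int × Int) × List String) :=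
  L.foldl
    (fun acc e =>
      if p (e.1, e.2.1) && (match acc with | none => true | some b => nbLt (e.1, e.2.1) b.1) then
        some ((e.1, e.2.1), e.2.2)
      else acc)
    none

theorem nbLookup_append_left {L : List (Int × Int × List String)} {e : Int × Int × List String}
    {k : Int × Int} (h : ∃ x ∈ L, (x.1, x.2.1) = k) :
    nbLookup (L ++ [e]) k = nbLookup L k := by
  induction L with
  | nil => simp at h
  | cons a t ih =>
    simp only [List.cons_append, nbLookup]
    split
    · rfl
    · rename_i hne
      apply ih
      rcases h with ⟨x, hx, hk⟩
      rcases List.mem_cons.mp hx with rfl | hx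
      · exact absurd hk hne
      · exact ⟨x, hx, hk⟩

theorem nbLookup_append_self {L : List (Int × Int × List String)} {e : Int × Int × List String}
    (h : ∀ x ∈ L, (x.1, x.2.1) ≠ (e.1, e.2.1)) :
    nbLookup (L ++ [e]) (e.1, e.2.1) = e.2.2 := by
  induction L with
  | nil => simp [nbLookup]
  | cons a t ih =>
    simp only [List.cons_append, nbLookup]
    rw [if_neg (h a List.mem_cons_self)]
    exact ih (fun x hx => h x (List.mem_cons_of_mem _ hx))

theorem nbLt_false_le {a b : Int × Int} (h : ¬ nbLt a b = true) : nbLe b a := by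
  unfold nbLt at h; unfold nbLe; simp at h; omega
theorem nbLt_true_le {a b : Int × Int} (h : nbLt a b = true) : nbLe a b := by
  unfold nbLt at h; unfold nbLe; simp at h; omega
theorem nbLt_strict {a b : Int × Int} (h : nbLt a b = true) :
    a.1 < b.1 ∨ (a.1 = b.1 ∧ a.2 < b.2) := by
  unfold nbLt at h; simpa using h

-- full characterisation of nbSel: none iff nothing qualifies; otherwise the result is the
-- lex-least qualifying key with the name list of its first occurrence
theorem nbSel_spec (p : Int × Int → Bool) (L : List (Int × Int × List String)) :
    (nbSel p L = none ↔ ∀ e ∈ L, p (e.1, e.2.1) = false) ∧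
    (∀ m ns, nbSel p L = some (m, ns) →
      p m = true ∧ (∃ e ∈ L, (e.1, e.2.1) = m) ∧
      (∀ e ∈ L, p (e.1, e.2.1) = true → nbLe m (e.1, e.2.1)) ∧
      ns = nbLookup L m) := by
  induction L using List.reverseRecOn with
  | nil => simp [nbSel]
  | append_singleton L e ih =>
    obtain ⟨ihn, ihs⟩ := ih
    have hstep : nbSel p (L ++ [e]) =
        (if p (e.1, e.2.1) && (match nbSel p L with | none => true | some b => nbLt (e.1, e.2.1) b.1) then
          some ((e.1, e.2.1), e.2.2)
        else nbSel p L) := by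
      unfold nbSel
      rw [List.foldl_append]
      rfl
    cases hL : nbSel p L with
    | none =>
      rw [hL] at hstep
      simp only [Bool.and_true] at hstep
      have hall : ∀ x ∈ L, p (x.1, x.2.1) = false := ihn.mp hL
      by_cases hpe : p (e.1, e.2.1) = true
      · rw [if_pos hpe] at hstep
        constructor
        · rw [hstep]
          constructor
          · intro h; simp at h
          · intro h
            exact absurd (h e (by simp)) (by simp [hpe])
        · intro m ns hsome
          rw [hstep] at hsome
          obtain ⟨rfl, rfl⟩ : (e.1, e.2.1) = m ∧ e.2.2 = ns := by
            refine ⟨?_, ?_⟩ <;> injection hsome with h1 <;> [exact congrArg Prod.fst h1; exact congrArg Prod.snd h1]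
          have hnokey : ∀ x ∈ L, (x.1, x.2.1) ≠ (e.1, e.2.1) := by
            intro x hx hkeq
            exact absurd (hkeq ▸ hall x hx) (by simp [hpe])
          refine ⟨hpe, ⟨e, by simp⟩, ?_, (nbLookup_append_self hnokey).symm⟩
          intro x hx hpx
          rcases List.mem_append.mp hx with hx | hx
          · exact absurd (hall x hx) (by simp [hpx])
          · rcases List.mem_singleton.mp hx with rfl
            exact nbLe_refl _
      · rw [if_neg hpe] at hstep
        constructor
        · rw [hstep]
          constructor
          · intro _ x hx
            rcases List.mem_append.mp hx with hx | hx
            · exact hall x hx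
            · rcases List.mem_singleton.mp hx with rfl
              simpa using hpe
          · intro _; rfl
        · intro m ns hsome
          rw [hstep] at hsome
          simp at hsome
    | some b =>
      rw [hL] at hstep
      obtain ⟨bk, bns⟩ := b
      obtain ⟨hbp, hbmem, hbmin, hbns⟩ := ihs bk bns hL
      rw [show (match some ((bk, bns) : (Int × Int) × List String) with | none => true | some b => nbLt (e.1, e.2.1) b.1) = nbLt (e.1, e.2.1) bk from rfl] at hstep
      constructor
      · constructor
        · intro h
          rw [hstep] at h
          split at h <;> simp at h
        · intro h
          have : nbSel p L = none := ihn.mpr (fun x hx => h x (List.mem_append_left _ hx))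
          rw [this] at hL; simp at hL
      · intro m ns hsome
        rw [hstep] at hsome
        by_cases hcnd : (p (e.1, e.2.1) && nbLt (e.1, e.2.1) bk) = true
        · rw [if_pos hcnd] at hsome
          rcases Bool.and_eq_true_iff.mp hcnd with ⟨hpe, hlt⟩
          obtain ⟨rfl, rfl⟩ : (e.1, e.2.1) = m ∧ e.2.2 = ns := by
            refine ⟨?_, ?_⟩ <;> injection hsome with h1 <;> [exact congrArg Prod.fst h1; exact congrArg Prod.snd h1]
          have hnokey : ∀ x ∈ L, (x.1, x.2.1) ≠ (e.1, e.2.1) := by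
            intro x hx hkeq
            have hmin := hbmin x hx (by rw [hkeq]; exact hpe)
            have hle := nbLt_strict hlt
            rw [hkeq] at hmin
            unfold nbLe at hmin
            dsimp only at hmin hle
            omega
          refine ⟨hpe, ⟨e, by simp⟩, ?_, (nbLookup_append_self hnokey).symm⟩
          intro x hx hpx
          rcases List.mem_append.mp hx with hx | hx
          · exact nbLe_trans (nbLt_true_le hlt) (hbmin x hx hpx)
          · rcases List.mem_singleton.mp hx with rfl
            exact nbLe_refl _
        · rw [if_neg hcnd] at hsome
          obtain ⟨rfl, rfl⟩ : bk = m ∧ bns = ns := by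
            refine ⟨?_, ?_⟩ <;> injection hsome with h1 <;> [exact congrArg Prod.fst h1; exact congrArg Prod.snd h1]
          refine ⟨hbp, ⟨hbmem.choose, List.mem_append_left _ hbmem.choose_spec.1, hbmem.choose_spec.2⟩, ?_, ?_⟩
          · intro x hx hpx
            rcases List.mem_append.mp hx with hx | hx
            · exact hbmin x hx hpx
            · rcases List.mem_singleton.mp hx with rfl
              simp only [hpx, Bool.true_and] at hcnd
              exact nbLt_false_le hcnd
          · rw [hbns]
            exact (nbLookup_append_left ⟨hbmem.choose, hbmem.choose_spec.1, hbmem.choose_spec.2⟩).symm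

-- A's sorted2 call is a lex sort: identify it with sorting by the Lex key, then use sorted_pairwise
theorem sorted2_eq_sorted_lex (xs : List (Int × Int)) :
    PySem.List.sorted2 xs (fun k => k.1) (fun k => k.2) =
    PySem.List.sorted xs (fun k => toLex k) := by
  unfold PySem.List.sorted2 PySem.List.sorted
  have h : (fun (a b : Int × Int) => decide ((fun k => toLex k) a < (fun k => toLex k) b)) =
      (fun (a b : Int × Int) => decide (a.1 < b.1) || (!decide (b.1 < a.1) && decide (a.2 < b.2))) := by
    funext a b
    by_cases h1 : a.1 < b.1
    · simp [Prod.Lex.toLex_lt_toLex, h1]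
    · by_cases h2 : b.1 < a.1
      · have hne : ¬ (a.1 = b.1) := by omega
        simp [Prod.Lex.toLex_lt_toLex, h1, h2, hne]
      · have heq : a.1 = b.1 := by omega
        simp [Prod.Lex.toLex_lt_toLex, heq]
  simp only [if_neg (by decide : ¬ (false = true))]
  rw [h]

theorem sorted2_pairwise (xs : List (Int × Int)) :
    List.Pairwise nbLe (PySem.List.sorted2 xs (fun k => k.1) (fun k => k.2)) := by
  rw [sorted2_eq_sorted_lex]
  have := PySem.List.sorted_pairwise xs (fun k => toLex k)
  refine this.imp ?_
  intro a b hab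
  have : a.1 < b.1 ∨ (a.1 = b.1 ∧ a.2 ≤ b.2) := by
    rcases eq_or_lt_of_le hab with h | h
    · have : a = b := toLex.injective h
      subst this; omega
    · have := Prod.Lex.toLex_lt_toLex.mp h
      omega
  exact this

-- B's loop body is a pair of independent accumulators
theorem alt_eq (date : Int × Int) (bs : List (Int × Int × List String)) (h : ¬ bs = []) :
    next_birthday_alt date bs =
      (match nbSel (fun k => nbLt date k) bs with
      | some x => x
      | none => (match nbSel (fun _ => true) bs with | some x => x | none => ((1, 1), []))) := by
  simp only [next_birthday_alt, if_neg h]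
  have hsplit := PySem.List.foldl_prod_mk
    (f := fun (acc : Option ((Int × Int) × List String)) (e : Int × Int × List String) =>
      if nbLt date (e.1, e.2.1) && (match acc with | none => true | some b => nbLt (e.1, e.2.1) b.1) then
        some ((e.1, e.2.1), e.2.2) else acc)
    (g := fun (acc : Option ((Int × Int) × List String)) (e : Int × Int × List String) =>
      if (match acc with | none => true | some b => nbLt (e.1, e.2.1) b.1) then
        some ((e.1, e.2.1), e.2.2) else acc)
    (l := bs) (a := none) (b := none)
  rw [show (List.foldl (fun (st : Option ((Int × Int) × List String) × Option ((Int × Int) × List String)) (e : Int × Int × List String) =>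
      ((if (nbLt date (e.1, e.2.1) && (match st.1 with | none => true | some b => nbLt (e.1, e.2.1) b.1)) = true then some ((e.1, e.2.1), e.2.2) else st.1),
       (if ((match st.2 with | none => true | some b => nbLt (e.1, e.2.1) b.1) : Bool) = true then some ((e.1, e.2.1), e.2.2) else st.2))) (none, none) bs)
    = (nbSel (fun k => nbLt date k) bs, nbSel (fun _ => true) bs) from hsplit]

theorem nb_eq_alt (date : Int × Int) (bs : List (Int × Int × List String)) :
    next_birthday date bs = next_birthday_alt date bs := by
  by_cases hbs : bs = []
  · subst hbs; rfl
  · rw [alt_eq date bs hbs]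
    simp only [next_birthday, if_neg hbs]
    have hpred : (fun (d : Int × Int) => decide (d.1 > date.1 ∨ (d.1 = date.1 ∧ d.2 > date.2))) =
        (fun d => nbLt date d) := by
      funext d; unfold nbLt; exact decide_eq_decide.mpr (by omega)
    rw [hpred]
    have hperm : (PySem.List.sorted2 (bs.map (fun e => (e.1, e.2.1))) (fun k => k.1) (fun k => k.2)).Perm
        (bs.map (fun e => (e.1, e.2.1))) := PySem.List.sorted2_perm _ _ _ false
    have hpair := sorted2_pairwise (bs.map (fun e => (e.1, e.2.1)))
    set S := PySem.List.sorted2 (bs.map (fun e => (e.1, e.2.1))) (fun k => k.1) (fun k => k.2) with hSdef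
    obtain ⟨selN_none, selN_some⟩ := nbSel_spec (fun k => nbLt date k) bs
    obtain ⟨selA_none, selA_some⟩ := nbSel_spec (fun _ => true) bs
    cases hfind : S.find? (fun d => nbLt date d) with
    | some d =>
      obtain ⟨hdS, hdp, hdmin⟩ := find?_sorted_min hpair hfind
      have hdK : d ∈ bs.map (fun e => (e.1, e.2.1)) := hperm.mem_iff.mp hdS
      obtain ⟨e0, he0, hk0⟩ := List.mem_map.mp hdK
      cases hsel : nbSel (fun k => nbLt date k) bs with
      | none =>
        exfalso
        have := selN_none.mp hsel e0 he0
        rw [hk0, hdp] at this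
        simp at this
      | some x =>
        obtain ⟨xk, xns⟩ := x
        obtain ⟨hxp, hxmem, hxmin, hxns⟩ := selN_some xk xns hsel
        have hxk_eq : xk = d := by
          have h1 : nbLe xk d := hk0 ▸ hxmin e0 he0 (by rw [hk0]; exact hdp)
          obtain ⟨e1, he1, hk1⟩ := hxmem
          have hxkS : xk ∈ S := hperm.mem_iff.mpr (List.mem_map.mpr ⟨e1, he1, hk1⟩)
          have h2 : nbLe d xk := hdmin xk hxkS hxp
          exact nbLe_antisymm h1 h2
        simp only [hxk_eq, hxns]
    | none =>
      have hSne : S ≠ [] := by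
        intro h
        rw [h] at hperm
        have hK : bs.map (fun e => (e.1, e.2.1)) = [] := List.Perm.nil_eq hperm ▸ rfl
        exact hbs (List.map_eq_nil_iff.mp hK)
      obtain ⟨h0, t, hScons⟩ := List.exists_cons_of_ne_nil hSne
      have hall : ∀ y ∈ S, nbLt date y = false := by
        intro y hy
        simpa using List.find?_eq_none.mp hfind y hy
      have hselN : nbSel (fun k => nbLt date k) bs = none :=
        selN_none.mpr (fun e he => hall _ (hperm.mem_iff.mpr (List.mem_map.mpr ⟨e, he, rfl⟩)))
      rw [hselN]
      cases hselA : nbSel (fun _ => true) bs with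
      | none =>
        exfalso
        obtain ⟨e0, t0, rfl⟩ := List.exists_cons_of_ne_nil hbs
        simpa using selA_none.mp hselA e0 List.mem_cons_self
      | some x =>
        obtain ⟨xk, xns⟩ := x
        obtain ⟨_, hxmem, hxmin, hxns⟩ := selA_some xk xns hselA
        have hxk_eq : xk = h0 := by
          have hh0S : h0 ∈ S := by rw [hScons]; exact List.mem_cons_self
          have hh0K := hperm.mem_iff.mp hh0S
          obtain ⟨e1, he1, hk1⟩ := List.mem_map.mp hh0K
          have h1 : nbLe xk h0 := hk1 ▸ hxmin e1 he1 rfl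
          have h2 : nbLe h0 xk := by
            obtain ⟨e2, he2, hk2⟩ := hxmem
            have hxkS : xk ∈ S := hperm.mem_iff.mpr (List.mem_map.mpr ⟨e2, he2, hk2⟩)
            rw [hScons] at hxkS
            rcases List.mem_cons.mp hxkS with rfl | hxkt
            · exact nbLe_refl _
            · exact (List.pairwise_cons.mp (hScons ▸ hpair)).1 xk hxkt
          exact nbLe_antisymm h1 h2
        rw [hScons]
        simp only [List.headD_cons, hxk_eq, hxns]

-- ===== VERDICT (by name: the statement is the Claim_ definition above) =====
theorem next_birthday_spec : Claim_equal_next_birthday := by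
  intro date bs _
  unfold Spec_next_birthday
  exact nb_eq_alt date bs
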